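-- pv_equiv track=rewrite | github.com/Leet-Lyn/Python | .Backups/TextWordEditingByLine.py | replace_string_in_lines
-- ===== SOURCE A (Python) =====
-- def replace_string_in_lines(lines, old, new, times_per_line):
--     """
--     在每行中替换指定字符（子串）若干次
--     times_per_line: 正数=正向替换，负数=逆向替换
--     """
--     new_lines = []
--     for line in lines:
--         if times_per_line >= 0:
--             # 正向替换
--             new_line = line
--             count = 0
--             start = 0
--             while count < times_per_line:
--                 idx = new_line.find(old, start)
--                 if idx == -1:
--                     break
--                 new_line = new_line[:idx] + new + new_line[idx + len(old):]
--                 count += 1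
--                 start = idx + len(new)
--             new_lines.append(new_line)
--         else:
--             # 逆向替换：反转字符串，替换子串也反转，再反转回来
--             rev_line = line[::-1]
--             rev_old = old[::-1]
--             rev_new = new[::-1]
--             rev_times = -times_per_line
--             new_rev_line = rev_line
--             count = 0
--             start = 0
--             while count < rev_times:
--                 idx = new_rev_line.find(rev_old, start)
--                 if idx == -1:
--                     break
--                 new_rev_line = new_rev_line[:idx] + rev_new + new_rev_line[idx + len(rev_old):]
--                 count += 1
--                 start = idx + len(rev_new)
--             new_line = new_rev_line[::-1]
--             new_lines.append(new_line)
--     return new_lines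
-- ===== SOURCE B (Python) =====
-- def replace_string_in_lines(lines, old, new, times_per_line):
--     """
--     Replace up to |times_per_line| occurrences of old per line
--     (forward if times_per_line >= 0, the last ones if negative),
--     by repeatedly cutting off pieces and rejoining them with new.
--     """
--     if times_per_line >= 0:
--         def rep(s):
--             t = times_per_line
--             parts = []
--             while t > 0:
--                 i = s.find(old)
--                 if i == -1:
--                     break
--                 parts.append(s[:i])
--                 s = s[i + len(old):]
--                 t -= 1
--             parts.append(s)
--             return new.join(parts)
--         return [rep(line) for line in lines]
--     else:
--         def rep(s):
--             t = -times_per_line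
--             tails = []
--             while t > 0:
--                 i = s.rfind(old)
--                 if i == -1:
--                     break
--                 tails.append(s[i + len(old):])
--                 s = s[:i]
--                 t -= 1
--             return new.join([s] + tails[::-1])
--         return [rep(line) for line in lines]
-- ===== Notes on version B (the rewrite author's own statement) =====
-- stated objective: simpler
-- what changed: A splices each replacement into the whole line and keeps a running start index (and reverses the string, the pattern and the replacement to do the negative 'last N' direction); B instead repeatedly cuts the line at the occurrence (find forward, rfind backward), collects the pieces and rejoins them once with the replacement, with no start pointer and no string reversal.
import Mathlib
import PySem

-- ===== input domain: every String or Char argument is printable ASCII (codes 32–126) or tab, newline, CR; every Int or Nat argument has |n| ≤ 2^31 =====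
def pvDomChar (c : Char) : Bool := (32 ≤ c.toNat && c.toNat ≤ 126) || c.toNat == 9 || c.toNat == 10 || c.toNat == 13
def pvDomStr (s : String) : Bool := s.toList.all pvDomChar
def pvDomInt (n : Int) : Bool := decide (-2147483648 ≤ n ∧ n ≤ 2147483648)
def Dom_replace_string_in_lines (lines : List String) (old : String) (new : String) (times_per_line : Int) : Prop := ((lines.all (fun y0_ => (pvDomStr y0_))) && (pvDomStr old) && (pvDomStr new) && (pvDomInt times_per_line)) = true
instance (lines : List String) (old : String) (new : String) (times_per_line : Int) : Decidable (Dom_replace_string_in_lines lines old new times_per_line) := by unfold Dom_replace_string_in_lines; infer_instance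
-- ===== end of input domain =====

-- B replaces A's in-place splice loop with a start pointer (and A's string-reversal trick
-- for the negative direction) by a cut-off-pieces-and-rejoin loop (rfind for the negative
-- direction); objective: simpler (no reversal, no running start index), same behaviour on all inputs.

-- ===== PORT A =====
-- A's forward while-loop: 'while count < times_per_line' with state (new_line, start);
-- fuel = number of remaining allowed replacements.  find(old, start) → PySem.Chars.findFrom.
def pvLoopA (old new : List Char) : Nat → List Char → Nat → List Char
  | 0, s, _ => s
  | fuel + 1, s, start =>
    let idx : Int := PySem.Chars.findFrom s old (start : Int) none
    if idx = -1 then s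
    else pvLoopA old new fuel
      (PySem.List.slice s none (some idx) ++ new ++ PySem.List.slice s (some (idx + old.length)) none)
      (idx.toNat + new.length)

def replace_string_in_lines (lines : List String) (old : String) (new : String) (times_per_line : Int) : List String :=
  -- new_lines = []; for line in lines: … ; new_lines.append(new_line)
  lines.foldl (fun new_lines line =>
    if times_per_line ≥ 0 then
      new_lines ++ [String.ofList (pvLoopA old.toList new.toList times_per_line.toNat line.toList 0)]
    else
      -- line[::-1] is List.reverse (PySem.List.slice?_none_none_neg_one); the reversed loop
      -- is the same while-loop on the reversed strings, then reversed back.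
      new_lines ++ [String.ofList ((pvLoopA old.toList.reverse new.toList.reverse
        (-times_per_line).toNat line.toList.reverse 0).reverse)]) []

-- ===== PORT B =====
-- Source B forward rep: cut off the piece before each occurrence, keep the remainder, rejoin with new.
def pvBFwd (old new : List Char) : Nat → List Char → List (List Char) → List Char
  | 0, s, parts => PySem.Chars.join new (parts.reverse ++ [s])
  | t + 1, s, parts =>
    let i : Int := PySem.Chars.find s old
    if i = -1 then PySem.Chars.join new (parts.reverse ++ [s])
    else pvBFwd old new t
      (PySem.List.slice s (some (i + old.length)) none)
      (PySem.List.slice s none (some i) :: parts)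

-- Source B backward rep: cut off the tail after the LAST occurrence (rfind), keep the head;
-- tails are collected right-to-left, so the cons-accumulator is already tails[::-1].
def pvBBwd (old new : List Char) : Nat → List Char → List (List Char) → List Char
  | 0, s, tails => PySem.Chars.join new (s :: tails)
  | t + 1, s, tails =>
    let i : Int := PySem.Chars.rfind s old
    if i = -1 then PySem.Chars.join new (s :: tails)
    else pvBBwd old new t
      (PySem.List.slice s none (some i))
      (PySem.List.slice s (some (i + old.length)) none :: tails)

def replace_string_in_lines_alt (lines : List String) (old : String) (new : String) (times_per_line : Int) : List String :=
  if times_per_line ≥ 0 then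
    lines.map (fun line => String.ofList (pvBFwd old.toList new.toList times_per_line.toNat line.toList []))
  else
    lines.map (fun line => String.ofList (pvBBwd old.toList new.toList (-times_per_line).toNat line.toList []))

-- ===== PRECONDITION & SPEC =====
def Spec_replace_string_in_lines (lines : List String) (old : String) (new : String) (times_per_line : Int) (out : List String) : Prop := out = replace_string_in_lines_alt lines old new times_per_line
instance (lines : List String) (old : String) (new : String) (times_per_line : Int) (out : List String) : Decidable (Spec_replace_string_in_lines lines old new times_per_line out) := by unfold Spec_replace_string_in_lines; infer_instance

-- ===== CLAIM (what is proved, stated in full; the proofs are below) =====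
def Claim_equal_replace_string_in_lines : Prop := ∀ (lines : List String) (old : String) (new : String) (times_per_line : Int), Dom_replace_string_in_lines lines old new times_per_line → Spec_replace_string_in_lines lines old new times_per_line (replace_string_in_lines lines old new times_per_line)

-- ===== LEMMAS AND PROOFS =====

-- recursive reference form of the forward replacement (proof-only)
def pvRepF (old new : List Char) : Nat → List Char → List Char
  | 0, s => s
  | t + 1, s =>
    let i : Int := PySem.Chars.find s old
    if i = -1 then s
    else s.take i.toNat ++ new ++ pvRepF old new t (s.drop (i.toNat + old.length))

-- recursive reference form of the backward replacement (proof-only)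
def pvRepB (old new : List Char) : Nat → List Char → List Char
  | 0, s => s
  | t + 1, s =>
    let i : Int := PySem.Chars.rfind s old
    if i = -1 then s
    else pvRepB old new t (s.take i.toNat) ++ new ++ s.drop (i.toNat + old.length)

theorem pv_join_cons_ne (new x : List Char) (l : List (List Char)) (h : l ≠ []) :
    PySem.Chars.join new (x :: l) = x ++ new ++ PySem.Chars.join new l := by
  cases l with
  | nil => exact absurd rfl h
  | cons y r => exact PySem.Chars.join_cons_cons new x y r

theorem pv_join_cons2 (new : List Char) (l : List (List Char)) (a b : List Char) :
    PySem.Chars.join new (a :: b :: l) = PySem.Chars.join new ((a ++ new ++ b) :: l) := by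
  cases l with
  | nil => simp [PySem.Chars.join_cons_cons, PySem.Chars.join_singleton]
  | cons c r =>
    rw [PySem.Chars.join_cons_cons, PySem.Chars.join_cons_cons, PySem.Chars.join_cons_cons]
    simp [List.append_assoc]

theorem pv_join_snoc2 (new : List Char) (l : List (List Char)) (a b : List Char) :
    PySem.Chars.join new (l ++ [a, b]) = PySem.Chars.join new (l ++ [a ++ new ++ b]) := by
  induction l with
  | nil => simpa using pv_join_cons2 new [] a b
  | cons x l ih =>
    rw [List.cons_append, List.cons_append,
      pv_join_cons_ne new x (l ++ [a, b]) (by simp),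
      pv_join_cons_ne new x (l ++ [a ++ new ++ b]) (by simp), ih]

theorem pvBFwd_eq_repF (old new : List Char) (t : Nat) (s : List Char) (parts : List (List Char)) :
    pvBFwd old new t s parts = PySem.Chars.join new (parts.reverse ++ [pvRepF old new t s]) := by
  induction t generalizing s parts with
  | zero => simp [pvBFwd, pvRepF]
  | succ t ih =>
    rw [pvBFwd, pvRepF]
    by_cases h : PySem.Chars.find s old = -1
    · simp [h]
    · have h0 : 0 ≤ PySem.Chars.find s old := by
        have := PySem.Chars.neg_one_le_find s old; omega
      simp only [h]
      rw [ih]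
      rw [PySem.List.slice_to s h0, PySem.List.slice_from s (by omega : (0:Int) ≤ PySem.Chars.find s old + old.length)]
      have ht : (PySem.Chars.find s old + (old.length : Int)).toNat
          = (PySem.Chars.find s old).toNat + old.length := by omega
      rw [ht]
      simp only [List.reverse_cons, List.append_assoc, List.cons_append, List.nil_append]
      have := pv_join_snoc2 new parts.reverse (List.take (PySem.Chars.find s old).toNat s)
        (pvRepF old new t (List.drop ((PySem.Chars.find s old).toNat + old.length) s))
      simpa [List.append_assoc] using this

-- rfind.go is -1 or a nonnegative index
theorem pvRfind_go_cases (s old : List Char) (k : Nat) :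
    PySem.Chars.rfind.go s old k = -1 ∨ 0 ≤ PySem.Chars.rfind.go s old k := by
  induction k with
  | zero =>
    by_cases h : old.isPrefixOf s <;> simp [PySem.Chars.rfind.go, h]
  | succ k ih =>
    by_cases h : old.isPrefixOf (s.drop (k+1))
    · right
      have e : PySem.Chars.rfind.go s old (k+1)
          = if old.isPrefixOf (s.drop (k+1)) then ((k:Int)+1) else PySem.Chars.rfind.go s old k := by
        simp [PySem.Chars.rfind.go]
      rw [e, if_pos h]
      omega
    · simpa [PySem.Chars.rfind.go, h] using ih

theorem pvBBwd_eq_repB (old new : List Char) (t : Nat) (s : List Char) (tails : List (List Char)) :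
    pvBBwd old new t s tails = PySem.Chars.join new (pvRepB old new t s :: tails) := by
  induction t generalizing s tails with
  | zero => simp [pvBBwd, pvRepB]
  | succ t ih =>
    rw [pvBBwd, pvRepB]
    by_cases h : PySem.Chars.rfind s old = -1
    · simp [h]
    · have h0 : 0 ≤ PySem.Chars.rfind s old := by
        have hcases : PySem.Chars.rfind s old = -1 ∨ 0 ≤ PySem.Chars.rfind s old :=
          pvRfind_go_cases s old s.length
        rcases hcases with h1 | h1 <;> omega
      simp only [h]
      rw [ih]
      rw [PySem.List.slice_to s h0, PySem.List.slice_from s (by omega : (0:Int) ≤ PySem.Chars.rfind s old + old.length)]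
      have ht : (PySem.Chars.rfind s old + (old.length : Int)).toNat
          = (PySem.Chars.rfind s old).toNat + old.length := by omega
      rw [ht]
      exact pv_join_cons2 new tails _ _

theorem pvLoopA_eq_repF (old new : List Char) (fuel : Nat) (s : List Char) (k : Nat) (hk : k ≤ s.length) :
    pvLoopA old new fuel s k = s.take k ++ pvRepF old new fuel (s.drop k) := by
  induction fuel generalizing s k with
  | zero => simp [pvLoopA, pvRepF]
  | succ fuel ih =>
    rw [pvLoopA, pvRepF]
    rw [PySem.Chars.findFrom_natCast s old k hk]
    by_cases h : PySem.Chars.find (s.drop k) old = -1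
    · simp [h]
    · have h0 : 0 ≤ PySem.Chars.find (s.drop k) old := by
        have := PySem.Chars.neg_one_le_find (s.drop k) old; omega
      have hidx : ¬ ((k : Int) + PySem.Chars.find (s.drop k) old = -1) := by omega
      simp only [h, hidx, if_false]
      set c := PySem.Chars.find (s.drop k) old with hc
      set j := c.toNat with hj
      have hcl : c ≤ (s.drop k).length := PySem.Chars.find_le_length (s.drop k) old
      have hjl : k + j ≤ s.length := by
        simp [List.length_drop] at hcl; omega
      have hpre : old <+: (s.drop k).drop j := (PySem.Chars.find_spec (by omega)).1
      have hfit : k + j + old.length ≤ s.length := by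
        have := hpre.length_le
        simp [List.length_drop] at this
        omega
      have htn : ((k : Int) + c).toNat = k + j := by omega
      have htn2 : ((k : Int) + c + (old.length : Int)).toNat = k + j + old.length := by omega
      rw [PySem.List.slice_to s (by omega : (0:Int) ≤ (k:Int) + c),
        PySem.List.slice_from s (by omega : (0:Int) ≤ (k:Int) + c + old.length), htn, htn2]
      have hlen2 : k + j + new.length ≤ (s.take (k + j) ++ new ++ s.drop (k + j + old.length)).length := by
        simp only [List.length_append, List.length_take, List.length_drop]
        omega
      rw [ih (s.take (k + j) ++ new ++ s.drop (k + j + old.length)) (k + j + new.length) hlen2]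
      have hl : (s.take (k + j) ++ new).length = k + j + new.length := by
        simp only [List.length_append, List.length_take]
        omega
      rw [List.take_left' hl, List.drop_left' hl]
      have e3 : List.drop (j + old.length) (List.drop k s) = List.drop (k + j + old.length) s := by
        rw [List.drop_drop]; congr 1; omega
      rw [e3, List.take_add]
      simp [List.append_assoc]

-- rfind.go returns -1 when there is no occurrence at any index ≤ k
theorem pvRfind_go_neg (s old : List Char) (k : Nat)
    (h : ∀ i, i ≤ k → ¬ old <+: s.drop i) : PySem.Chars.rfind.go s old k = -1 := by
  induction k with
  | zero =>
    have : old.isPrefixOf s = false := by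
      rw [Bool.eq_false_iff]
      intro hpf
      exact h 0 (le_refl 0) (by simpa using List.isPrefixOf_iff_prefix.mp hpf)
    simp [PySem.Chars.rfind.go, this]
  | succ k ih =>
    have : old.isPrefixOf (s.drop (k+1)) = false := by
      rw [Bool.eq_false_iff]
      intro hpf
      exact h (k+1) (le_refl _) (List.isPrefixOf_iff_prefix.mp hpf)
    simp [PySem.Chars.rfind.go, this]
    exact ih (fun i hi => h i (by omega))

-- rfind.go returns the highest matching index ≤ k
theorem pvRfind_go_eq (s old : List Char) (k i : Nat) (hik : i ≤ k)
    (hp : old <+: s.drop i)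
    (hmax : ∀ i', i < i' → i' ≤ k → ¬ old <+: s.drop i') :
    PySem.Chars.rfind.go s old k = (i : Int) := by
  induction k with
  | zero =>
    interval_cases i
    have : old.isPrefixOf s = true := List.isPrefixOf_iff_prefix.mpr (by simpa using hp)
    simp [PySem.Chars.rfind.go, this]
  | succ k ih =>
    by_cases htop : old <+: s.drop (k+1)
    · have hieq : i = k + 1 := by
        by_contra hne
        exact hmax (k+1) (by omega) (le_refl _) htop
      have : old.isPrefixOf (s.drop (k+1)) = true := List.isPrefixOf_iff_prefix.mpr htop
      simp [PySem.Chars.rfind.go, this, hieq]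
    · have hne : i ≠ k + 1 := fun he => htop (he ▸ hp)
      have : old.isPrefixOf (s.drop (k+1)) = false := by
        rw [Bool.eq_false_iff]; intro hpf; exact htop (List.isPrefixOf_iff_prefix.mp hpf)
      simp [PySem.Chars.rfind.go, this]
      exact ih (by omega) (fun i' hi' hik' => hmax i' hi' (by omega))

theorem pvRfind_eq_neg_one (s old : List Char) (h : ¬ old <:+: s) :
    PySem.Chars.rfind s old = -1 := by
  apply pvRfind_go_neg
  intro i _ hpf
  have hin : PySem.Chars.isIn old s = true :=
    (PySem.Chars.exists_prefix_drop_iff_isIn old s).mp ⟨i, hpf⟩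
  exact h ((PySem.Chars.isIn_iff_infix old s).mp hin)

theorem pvRfind_eq (s old : List Char) (i : Nat) (hil : i ≤ s.length)
    (hp : old <+: s.drop i)
    (hmax : ∀ i', i < i' → i' ≤ s.length → ¬ old <+: s.drop i') :
    PySem.Chars.rfind s old = (i : Int) :=
  pvRfind_go_eq s old s.length i hil hp hmax

-- occurrence mirror: a match of old.reverse at j in s.reverse is a match of old
-- at s.length - old.length - j in s (when it fits)
theorem pvMirror (s old : List Char) (j : Nat) (hfit : j + old.length ≤ s.length) :
    (old.reverse <+: s.reverse.drop j ↔ old <+: s.drop (s.length - old.length - j)) := by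
  rw [List.drop_reverse, List.reverse_prefix]
  rw [List.suffix_iff_eq_drop, List.prefix_iff_eq_take]
  have hlt : (s.take (s.length - j)).length = s.length - j := by
    simp only [List.length_take]; omega
  rw [hlt, List.drop_take]
  have h2 : s.length - j - (s.length - j - old.length) = old.length := by omega
  have h1 : s.length - j - old.length = s.length - old.length - j := by omega
  rw [h2, h1]

theorem pvRepF_rev_eq_repB (old new : List Char) (t : Nat) (s : List Char) :
    (pvRepF old.reverse new.reverse t s.reverse).reverse = pvRepB old new t s := by
  induction t generalizing s with
  | zero => simp [pvRepF, pvRepB]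
  | succ t ih =>
    rw [pvRepF, pvRepB]
    by_cases h : PySem.Chars.find s.reverse old.reverse = -1
    · have hni : ¬ old <:+: s := by
        rw [PySem.Chars.find_eq_neg_one_iff] at h
        intro hin; exact h (List.reverse_infix.mpr hin)
      have hr : PySem.Chars.rfind s old = -1 := pvRfind_eq_neg_one s old hni
      simp [h, hr]
    · have h0 : 0 ≤ PySem.Chars.find s.reverse old.reverse := by
        have := PySem.Chars.neg_one_le_find s.reverse old.reverse; omega
      set c := PySem.Chars.find s.reverse old.reverse with hc
      set j := c.toNat with hj
      have hpre : old.reverse <+: s.reverse.drop j := (PySem.Chars.find_spec h0).1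
      have hmin : ∀ j' < j, ¬ old.reverse <+: s.reverse.drop j' := (PySem.Chars.find_spec h0).2
      have hfit : j + old.length ≤ s.length := by
        have h1 := hpre.length_le
        rw [List.length_reverse, List.length_drop, List.length_reverse] at h1
        have h2 : c ≤ ((s.reverse).length : Int) := PySem.Chars.find_le_length s.reverse old.reverse
        rw [List.length_reverse] at h2
        omega
      set i := s.length - old.length - j with hi
      have hip : old <+: s.drop i := (pvMirror s old j hfit).mp hpre
      have hmaxi : ∀ i', i < i' → i' ≤ s.length → ¬ old <+: s.drop i' := by
        intro i' hii' hi'l hp'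
        have hfit' : i' + old.length ≤ s.length := by
          have := hp'.length_le
          simp [List.length_drop] at this
          omega
        have hj' : (s.length - old.length - i') + old.length ≤ s.length := by omega
        have := (pvMirror s old (s.length - old.length - i') hj').mpr (by
          have : s.length - old.length - (s.length - old.length - i') = i' := by omega
          rw [this]; exact hp')
        exact hmin (s.length - old.length - i') (by omega) this
      have hr : PySem.Chars.rfind s old = (i : Int) := pvRfind_eq s old i (by omega) hip hmaxi
      have hrne : ¬ (PySem.Chars.rfind s old = -1) := by rw [hr]; omega
      simp only [h, hrne, if_false]
      have htn : ((i : Int)).toNat = i := by omega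
      rw [hr, htn]
      rw [List.reverse_append, List.reverse_append, List.reverse_reverse]
      have hd : s.reverse.drop (j + old.reverse.length) = (s.take i).reverse := by
        rw [List.length_reverse, List.drop_reverse]
        have e : s.length - (j + old.length) = i := by omega
        rw [e]
      have htk : (s.reverse.take j).reverse = s.drop (i + old.length) := by
        rw [List.take_reverse, List.reverse_reverse]
        have e : s.length - j = i + old.length := by omega
        rw [e]
      rw [hd, ih, htk]
      simp [List.append_assoc]

theorem pv_foldl_snoc {α β : Type} (f : α → β) (l : List α) (acc : List β) :
    l.foldl (fun a x => a ++ [f x]) acc = acc ++ l.map f := by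
  induction l generalizing acc with
  | nil => simp
  | cons x l ih => simp [List.foldl_cons, ih, List.append_assoc]

-- ===== VERDICT (by name: the statement is the Claim_ definition above) =====
theorem replace_string_in_lines_spec : Claim_equal_replace_string_in_lines := by
  intro lines old new times _
  unfold Spec_replace_string_in_lines replace_string_in_lines replace_string_in_lines_alt
  by_cases h : times ≥ 0
  · simp only [h, if_pos]
    rw [pv_foldl_snoc]
    simp only [List.nil_append]
    apply List.map_congr_left
    intro line _
    congr 1
    rw [pvBFwd_eq_repF]
    rw [pvLoopA_eq_repF old.toList new.toList times.toNat line.toList 0 (Nat.zero_le _)]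
    simp [PySem.Chars.join_singleton]
  · simp only [h, if_false]
    rw [pv_foldl_snoc]
    simp only [List.nil_append]
    apply List.map_congr_left
    intro line _
    congr 1
    rw [pvBBwd_eq_repB]
    rw [pvLoopA_eq_repF old.toList.reverse new.toList.reverse (-times).toNat line.toList.reverse 0 (Nat.zero_le _)]
    simp only [List.take_zero, List.drop_zero, List.nil_append]
    rw [pvRepF_rev_eq_repB]
    simp [PySem.Chars.join_singleton]
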